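-- pv_equiv track=rewrite | github.com/JerryAllMighty/AlgorithmAndDataStructures | BaekJun/production/AlgorithmAndDataStructures/이것이코딩테스트다/MoneyCannotMake.py | solution
-- ===== SOURCE A (Python) =====
-- def solution(cnt, lst):
--     s = 1
--     lst.sort()
--     visited = []
--     for i in range(cnt):
--         if lst[i] not in visited:
--             visited.append(lst[i])
--         for j in range(i, cnt):
--             if lst[i] + lst[j] not in visited:
--                 visited.append(lst[i]+lst[j])
--     visited.sort()
--     while True:
--         if s in visited:
--             s +=1
--             continue
--         else:
--             break
--     return s
-- ===== SOURCE B (Python) =====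
-- def solution(cnt, lst):
--     lst.sort()
--     coins = {lst[i] for i in range(cnt)}
--
--     def reachable(s):
--         return s in coins or any(s - c in coins for c in coins)
--
--     s = 1
--     while reachable(s):
--         s += 1
--     return s
-- ===== Notes on version B (the rewrite author's own statement) =====
-- stated objective: faster
-- what changed: A enumerates all pairwise sums into a visited list (with linear membership scans) and then scans that list for s=1,2,...; B never enumerates pairs: it builds only the coin set and searches candidates s=1,2,... directly, testing each with a set-based two-sum check (s in coins or s-c in coins for some coin c).
import Mathlib
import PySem

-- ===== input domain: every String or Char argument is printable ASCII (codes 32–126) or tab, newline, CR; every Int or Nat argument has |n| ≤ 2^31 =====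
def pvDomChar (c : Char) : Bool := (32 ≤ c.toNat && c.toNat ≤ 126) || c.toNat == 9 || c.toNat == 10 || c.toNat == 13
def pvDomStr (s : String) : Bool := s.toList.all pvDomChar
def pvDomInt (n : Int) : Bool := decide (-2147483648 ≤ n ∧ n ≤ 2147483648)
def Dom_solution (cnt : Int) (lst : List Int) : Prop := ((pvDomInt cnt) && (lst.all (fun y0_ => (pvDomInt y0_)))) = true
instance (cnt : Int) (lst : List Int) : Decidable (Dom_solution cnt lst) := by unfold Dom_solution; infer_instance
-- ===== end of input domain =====

-- B drops A's pair enumeration entirely: it builds only the coin set and searches candidates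
-- s = 1, 2, … directly, testing each with a two-sum membership check (s in coins, or s-c in coins).
-- Both A and B sort the argument list in place (same mutation); the theorems are about the return value.

-- ===== PORT A =====
-- A's 'while True: if s in visited: s += 1' loop: visited holds no duplicates, so the loop runs at
-- most visited.length times; fuel visited.length + 1 always suffices (pv_loopA_spec below).
def solutionLoop : Nat → Int → List Int → Int
  | 0, s, _ => s
  | fuel + 1, s, visited => if s ∈ visited then solutionLoop fuel (s + 1) visited else s

-- the nested loops building 'visited' ('lst' here is the already-sorted list).
-- lst[i] is ported as pyGetD lst i 0: exact under Pre_solution (0 ≤ i < cnt ≤ len(lst));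
-- for cnt > len(lst) Python raises IndexError, excluded by Pre_solution.
def pvVisited (cnt : Int) (lst : List Int) : List Int :=
  (PySem.List.pyRange 0 cnt 1).foldl (fun visited i =>
    let visited := if PySem.List.pyGetD lst i 0 ∈ visited then visited
                   else visited ++ [PySem.List.pyGetD lst i 0]
    (PySem.List.pyRange i cnt 1).foldl (fun visited j =>
      if PySem.List.pyGetD lst i 0 + PySem.List.pyGetD lst j 0 ∈ visited then visited
      else visited ++ [PySem.List.pyGetD lst i 0 + PySem.List.pyGetD lst j 0]) visited) []

def solution (cnt : Int) (lst : List Int) : Int :=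
  let lst := PySem.List.sorted lst (fun x => x) false
  let visited := PySem.List.sorted (pvVisited cnt lst) (fun x => x) false
  solutionLoop (visited.length + 1) 1 visited

-- ===== PORT B =====
-- coins = {lst[i] for i in range(cnt)}  (pyGetD exact under Pre_solution as above)
def pvCoinsB (cnt : Int) (lst : List Int) : PySem.Set Int :=
  PySem.Set.ofList ((PySem.List.pyRange 0 cnt 1).map (fun i => PySem.List.pyGetD lst i 0))

-- reachable(s) = s in coins or any(s - c in coins for c in coins)
def pvReach (coins : List Int) (s : Int) : Bool :=
  decide (s ∈ coins) || coins.any (fun c => decide (s - c ∈ coins))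

-- B's 'while reachable(s): s += 1'. Fuel: every coin satisfies |c| ≤ M := max |coin|, so the
-- candidate 2*M + 2 is neither a coin nor 'coin + (value ≤ M)'; hence 2*M + 2 fuel suffices
-- (pv_loopB_spec / pv_unreach below).
def bLoop (coins : List Int) : Nat → Int → Int
  | 0, s => s
  | fuel + 1, s => if pvReach coins s then bLoop coins fuel (s + 1) else s

def solution_alt (cnt : Int) (lst : List Int) : Int :=
  let lst := PySem.List.sorted lst (fun x => x) false
  let coins := pvCoinsB cnt lst
  bLoop coins (2 * coins.foldl (fun m c => max m c.natAbs) 0 + 2) 1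

-- ===== PRECONDITION & SPEC =====
-- Pre_solution excludes exactly the inputs on which A raises IndexError (cnt exceeding len(lst)).
def Pre_solution (cnt : Int) (lst : List Int) : Prop := cnt ≤ (lst.length : Int)
instance (cnt : Int) (lst : List Int) : Decidable (Pre_solution cnt lst) := by
  unfold Pre_solution; infer_instance
def pvWitness_solution : Int × List Int := (3, [3, 1, 2])

def Spec_solution (cnt : Int) (lst : List Int) (out : Int) : Prop := out = solution_alt cnt lst
instance (cnt : Int) (lst : List Int) (out : Int) : Decidable (Spec_solution cnt lst out) := by
  unfold Spec_solution; infer_instance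

-- ===== CLAIM (what is proved, stated in full; the proofs are below) =====
def Claim_equal_solution : Prop := ∀ (cnt : Int) (lst : List Int),
  Dom_solution cnt lst → Pre_solution cnt lst → Spec_solution cnt lst (solution cnt lst)

-- ===== LEMMAS AND PROOFS =====

-- A's hand-rolled "append if not in" is exactly Python's set-add
theorem pv_addU_eq_add (v : List Int) (x : Int) :
    (if x ∈ v then v else v ++ [x]) = PySem.Set.add v x := by
  by_cases h : x ∈ v <;> simp [PySem.Set.add, PySem.Set.contains, h]

theorem pv_foldl_nested (l : List Int) (g : Int → List Int) (init : List Int) :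
    l.foldl (fun v i => (g i).foldl PySem.Set.add v) init
      = PySem.Set.update init (l.flatMap g) := by
  induction l generalizing init with
  | nil => simp [PySem.Set.update]
  | cons a l ih => simp [PySem.Set.update, List.foldl_append] at *; rw [ih]

-- A's visited is a set-update over the flattened item list
theorem pv_visited_eq (cnt : Int) (lst : List Int) :
    pvVisited cnt lst = PySem.Set.update []
      ((PySem.List.pyRange 0 cnt 1).flatMap (fun i =>
        PySem.List.pyGetD lst i 0 ::
          (PySem.List.pyRange i cnt 1).map (fun j =>
            PySem.List.pyGetD lst i 0 + PySem.List.pyGetD lst j 0))) := by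
  unfold pvVisited
  rw [← pv_foldl_nested]
  congr 1
  funext v i
  simp only [List.foldl_cons, List.foldl_map, ← pv_addU_eq_add]

theorem pv_mem_visited (cnt : Int) (lst : List Int) (x : Int) :
    x ∈ pvVisited cnt lst ↔
      (∃ i, 0 ≤ i ∧ i < cnt ∧ x = PySem.List.pyGetD lst i 0) ∨
      (∃ i j, 0 ≤ i ∧ i ≤ j ∧ j < cnt ∧
        x = PySem.List.pyGetD lst i 0 + PySem.List.pyGetD lst j 0) := by
  rw [pv_visited_eq, PySem.Set.mem_update]
  simp only [List.mem_flatMap, List.mem_cons, List.mem_map, PySem.List.mem_pyRange_one,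
    List.not_mem_nil, false_or]
  constructor
  · rintro ⟨i, ⟨h0, hi⟩, hx | ⟨j, ⟨hij, hj⟩, hx⟩⟩
    · exact Or.inl ⟨i, h0, hi, hx⟩
    · exact Or.inr ⟨i, j, h0, hij, hj, hx.symm⟩
  · rintro (⟨i, h0, hi, hx⟩ | ⟨i, j, h0, hij, hj, hx⟩)
    · exact ⟨i, ⟨h0, hi⟩, Or.inl hx⟩
    · exact ⟨i, ⟨h0, by omega⟩, Or.inr ⟨j, ⟨hij, hj⟩, hx.symm⟩⟩

-- membership in B's coin set
theorem pv_mem_coinsB (cnt : Int) (lst : List Int) (x : Int) :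
    x ∈ pvCoinsB cnt lst ↔ ∃ i, 0 ≤ i ∧ i < cnt ∧ x = PySem.List.pyGetD lst i 0 := by
  unfold pvCoinsB
  rw [PySem.Set.mem_ofList]
  simp only [List.mem_map, PySem.List.mem_pyRange_one]
  constructor
  · rintro ⟨i, ⟨h0, hi⟩, hx⟩; exact ⟨i, h0, hi, hx.symm⟩
  · rintro ⟨i, h0, hi, hx⟩; exact ⟨i, ⟨h0, hi⟩, hx.symm⟩

theorem pv_reach_iff (coins : List Int) (s : Int) :
    pvReach coins s = true ↔ s ∈ coins ∨ ∃ c ∈ coins, s - c ∈ coins := by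
  simp [pvReach]

-- the bridge: s is in A's visited list iff B's reachable test accepts s
theorem pv_bridge (cnt : Int) (lst : List Int) (s : Int) :
    s ∈ pvVisited cnt lst ↔ pvReach (pvCoinsB cnt lst) s = true := by
  rw [pv_mem_visited, pv_reach_iff]
  constructor
  · rintro (⟨i, h0, hi, hx⟩ | ⟨i, j, h0, hij, hj, hx⟩)
    · exact Or.inl ((pv_mem_coinsB cnt lst s).mpr ⟨i, h0, hi, hx⟩)
    · refine Or.inr ⟨PySem.List.pyGetD lst i 0,
        (pv_mem_coinsB cnt lst _).mpr ⟨i, h0, by omega, rfl⟩,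
        (pv_mem_coinsB cnt lst _).mpr ⟨j, by omega, hj, by omega⟩⟩
  · rintro (hc | ⟨c, hc, hd⟩)
    · obtain ⟨i, h0, hi, hx⟩ := (pv_mem_coinsB cnt lst s).mp hc
      exact Or.inl ⟨i, h0, hi, hx⟩
    · obtain ⟨i, hi0, hi, hxi⟩ := (pv_mem_coinsB cnt lst c).mp hc
      obtain ⟨j, hj0, hj, hxj⟩ := (pv_mem_coinsB cnt lst (s - c)).mp hd
      rcases le_or_gt i j with h | h
      · exact Or.inr ⟨i, j, hi0, h, hj, by omega⟩
      · exact Or.inr ⟨j, i, hj0, by omega, hi, by omega⟩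

-- the candidate 2*M + 2 (M = max |coin|) is unreachable
theorem pv_unreach (coins : List Int) :
    pvReach coins (2 * (coins.foldl (fun m c => max m c.natAbs) 0 : Nat) + 2) = false := by
  set M : Nat := coins.foldl (fun m c => max m c.natAbs) 0 with hM
  have hb : ∀ c ∈ coins, c.natAbs ≤ M :=
    (PySem.List.le_foldl_max_nat coins (fun c => c.natAbs) 0).2
  rw [← Bool.not_eq_true, pv_reach_iff]
  push Not
  constructor
  · intro hc
    have := hb _ hc
    omega
  · intro c hc hd
    have h1 := hb _ hc
    have h2 := hb _ hd
    omega

-- A's while loop: strict decrease of candidates ≥ s when s itself is in V (fuel bound)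
theorem pv_filter_len_dec (V : List Int) (s : Int) (hs : s ∈ V) :
    (V.filter (fun x => decide (s + 1 ≤ x))).length
      < (V.filter (fun x => decide (s ≤ x))).length := by
  have hsub : (V.filter (fun x => decide (s + 1 ≤ x))).Sublist
      (V.filter (fun x => decide (s ≤ x))) := by
    rw [show (V.filter (fun x => decide (s + 1 ≤ x)))
        = (V.filter (fun x => decide (s ≤ x))).filter (fun x => decide (s + 1 ≤ x)) by
      rw [List.filter_filter]
      apply List.filter_congr
      intro x _
      rw [Bool.eq_iff_iff]
      simp only [Bool.and_eq_true, decide_eq_true_eq]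
      omega]
    exact List.filter_sublist
  rcases Nat.lt_or_ge (V.filter (fun x => decide (s + 1 ≤ x))).length
      (V.filter (fun x => decide (s ≤ x))).length with h | h
  · exact h
  · exfalso
    have heq := hsub.eq_of_length (Nat.le_antisymm hsub.length_le h)
    have h1 : s ∈ V.filter (fun x => decide (s ≤ x)) := by
      simp [List.mem_filter, hs]
    rw [← heq] at h1
    simp [List.mem_filter] at h1

-- A's while loop returns the least s' ≥ s outside V (given enough fuel)
theorem pv_loopA_spec (V : List Int) (fuel : Nat) (s : Int)
    (h : (V.filter (fun x => decide (s ≤ x))).length < fuel) :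
    s ≤ solutionLoop fuel s V ∧ solutionLoop fuel s V ∉ V ∧
      ∀ t, s ≤ t → t < solutionLoop fuel s V → t ∈ V := by
  induction fuel generalizing s with
  | zero => omega
  | succ fuel ih =>
    by_cases hs : s ∈ V
    · have hdec := pv_filter_len_dec V s hs
      obtain ⟨h1, h2, h3⟩ := ih (s + 1) (by omega)
      rw [solutionLoop, if_pos hs]
      refine ⟨by omega, h2, ?_⟩
      intro t ht1 ht2
      by_cases hts : t = s
      · rwa [hts]
      · exact h3 t (by omega) ht2
    · rw [solutionLoop, if_neg hs]
      exact ⟨le_refl s, hs, fun t h1 h2 => absurd h2 (by omega)⟩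

-- B's while loop returns the least s' ≥ s failing pvReach, given some failure within the fuel
theorem pv_loopB_spec (coins : List Int) (fuel : Nat) (s : Int)
    (h : ∃ k : Nat, k < fuel ∧ pvReach coins (s + k) = false) :
    s ≤ bLoop coins fuel s ∧ pvReach coins (bLoop coins fuel s) = false ∧
      ∀ t, s ≤ t → t < bLoop coins fuel s → pvReach coins t = true := by
  induction fuel generalizing s with
  | zero => obtain ⟨k, hk, _⟩ := h; omega
  | succ fuel ih =>
    obtain ⟨k, hk, hf⟩ := h
    by_cases hs : pvReach coins s = true
    · have hk0 : k ≠ 0 := by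
        intro h0
        rw [h0] at hf
        simp at hf
        rw [hf] at hs
        exact absurd hs (by simp)
      obtain ⟨h1, h2, h3⟩ := ih (s + 1)
        ⟨k - 1, by omega, by rw [show s + 1 + ((k - 1 : Nat) : Int) = s + k by omega]; exact hf⟩
      rw [bLoop, if_pos hs]
      refine ⟨by omega, h2, ?_⟩
      intro t ht1 ht2
      by_cases hts : t = s
      · rwa [hts]
      · exact h3 t (by omega) ht2
    · rw [bLoop, if_neg hs]
      exact ⟨le_refl s, by simpa using hs, fun t h1 h2 => absurd h2 (by omega)⟩

-- both searches name the least positive value A's visited / B's reachable test misses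
theorem pv_final (cnt : Int) (lst : List Int) : solution cnt lst = solution_alt cnt lst := by
  unfold solution solution_alt
  set L := PySem.List.sorted lst (fun x => x) false with hL
  set V := PySem.List.sorted (pvVisited cnt L) (fun x => x) false with hV
  set coins := pvCoinsB cnt L with hcoins
  set M : Nat := coins.foldl (fun m c => max m c.natAbs) 0 with hM
  simp only []
  have hmemV : ∀ t : Int, t ∈ V ↔ pvReach coins t = true := fun t => by
    rw [hV, PySem.List.mem_sorted, pv_bridge]
  obtain ⟨ha1, ha2, ha3⟩ := pv_loopA_spec V (V.length + 1) 1
    (Nat.lt_succ_of_le (List.length_filter_le _ _))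
  obtain ⟨hb1, hb2, hb3⟩ := pv_loopB_spec coins (2 * M + 2) 1
    ⟨2 * M + 1, by omega, by
      rw [show (1 : Int) + ((2 * M + 1 : Nat) : Int) = 2 * (M : Nat) + 2 by push_cast; ring]
      exact pv_unreach coins⟩
  rcases lt_trichotomy (solutionLoop (V.length + 1) 1 V) (bLoop coins (2 * M + 2) 1)
    with h | h | h
  · exact absurd ((hmemV _).mpr (hb3 _ ha1 h)) ha2
  · exact h
  · exact absurd ((hmemV _).mp (ha3 _ hb1 h)) (by simp [hb2])

-- ===== VERDICT (by name: the statement is the Claim_ definition above) =====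
theorem solution_spec : Claim_equal_solution := by
  intro cnt lst _ _
  unfold Spec_solution
  exact pv_final cnt lst
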